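-- pv_equiv track=rewrite | github.com/gepmat/Projet_IDH | python/GeneOntology.py | annotation
-- ===== SOURCE A (Python) =====
-- def annotation(Go,Term): # cette fonction permet le tri d'une liste de GO term afion de les répartir dans les trois domaines de la GO
-- 	biological_process = []
-- 	molecular_function = []
-- 	cellular_component = []
-- 	for GO in Term:
-- 		if Go['nodes'][GO]['namespace'] == 'biological_process':
-- 			biological_process.append(GO)
-- 		elif Go['nodes'][GO]['namespace'] == 'molecular_function':
-- 			molecular_function.append(GO)
-- 		elif Go['nodes'][GO]['namespace'] == 'cellular_component':
-- 			cellular_component.append(GO)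
-- 	return(biological_process,len(biological_process),molecular_function,len(molecular_function),cellular_component,len(cellular_component))
-- ===== SOURCE B (Python) =====
-- def annotation(Go, Term):
--     biological_process = [GO for GO in Term if Go['nodes'][GO]['namespace'] == 'biological_process']
--     molecular_function = [GO for GO in Term if Go['nodes'][GO]['namespace'] == 'molecular_function']
--     cellular_component = [GO for GO in Term if Go['nodes'][GO]['namespace'] == 'cellular_component']
--     return (biological_process, len(biological_process),
--             molecular_function, len(molecular_function),
--             cellular_component, len(cellular_component))
-- ===== Notes on version B (the rewrite author's own statement) =====
-- stated objective: alternative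
-- what changed: Replaces the single pass with three mutable accumulators and an if/elif chain by three independent filtered scans of Term (one comprehension per namespace), each performing the same per-term lookup so it raises exactly where A raises.
import Mathlib
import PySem

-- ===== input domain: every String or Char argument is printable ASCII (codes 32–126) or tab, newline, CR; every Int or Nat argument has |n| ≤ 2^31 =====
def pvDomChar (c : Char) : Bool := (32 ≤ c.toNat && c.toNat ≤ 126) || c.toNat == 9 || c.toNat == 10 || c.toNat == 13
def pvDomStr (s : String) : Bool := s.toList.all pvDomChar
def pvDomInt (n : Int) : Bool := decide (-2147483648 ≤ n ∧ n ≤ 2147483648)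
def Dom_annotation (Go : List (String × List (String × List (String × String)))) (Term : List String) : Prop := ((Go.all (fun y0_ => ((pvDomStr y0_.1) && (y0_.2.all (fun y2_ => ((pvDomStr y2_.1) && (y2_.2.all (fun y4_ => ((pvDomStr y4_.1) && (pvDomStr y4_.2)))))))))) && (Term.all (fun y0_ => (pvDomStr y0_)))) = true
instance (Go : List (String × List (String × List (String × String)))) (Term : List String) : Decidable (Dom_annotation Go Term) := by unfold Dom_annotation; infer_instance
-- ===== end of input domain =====

-- ===== PORT A =====
-- B changes the decomposition: three independent filtered scans instead of one if/elif pass (objective: alternative).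
-- Lookup Go['nodes'][GO]['namespace'], with "" standing in where a key is missing
-- (Pre_annotation restricts the claim to inputs where every lookup succeeds, i.e. where the Python returns).
def pvNs (Go : List (String × List (String × List (String × String)))) (GO : String) : String :=
  (PySem.Dict.get? (PySem.Dict.mk
    ((PySem.Dict.get? (PySem.Dict.mk ((PySem.Dict.get? (PySem.Dict.mk Go) "nodes").getD [])) GO).getD []))
    "namespace").getD ""

def annotation (Go : List (String × List (String × List (String × String)))) (Term : List String) : List String × Int × List String × Int × List String × Int :=
  let st := Term.foldl (fun (st : List String × List String × List String) GO =>
    let (bp, mf, cc) := st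
    if pvNs Go GO = "biological_process" then (bp ++ [GO], mf, cc)
    else if pvNs Go GO = "molecular_function" then (bp, mf ++ [GO], cc)
    else if pvNs Go GO = "cellular_component" then (bp, mf, cc ++ [GO])
    else (bp, mf, cc)) ([], [], [])
  (st.1, (st.1.length : Int), st.2.1, (st.2.1.length : Int), st.2.2, (st.2.2.length : Int))

-- ===== PORT B =====
def annotation_alt (Go : List (String × List (String × List (String × String)))) (Term : List String) : List String × Int × List String × Int × List String × Int :=
  let bp := Term.filter (fun GO => pvNs Go GO == "biological_process")
  let mf := Term.filter (fun GO => pvNs Go GO == "molecular_function")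
  let cc := Term.filter (fun GO => pvNs Go GO == "cellular_component")
  (bp, (bp.length : Int), mf, (mf.length : Int), cc, (cc.length : Int))

-- ===== PRECONDITION & SPEC =====
-- Pre_ excludes exactly the inputs on which the Python A raises a KeyError: for every term of Term, the
-- 'nodes' entry of Go, its entry for that term, and that node's 'namespace' entry must all exist
-- (if Term is empty no lookup happens and both programs return the empty result).
def Pre_annotation (Go : List (String × List (String × List (String × String)))) (Term : List String) : Prop :=
  ∀ GO ∈ Term,
    (PySem.Dict.get? (PySem.Dict.mk Go) "nodes").isSome = true ∧
    (PySem.Dict.get? (PySem.Dict.mk ((PySem.Dict.get? (PySem.Dict.mk Go) "nodes").getD [])) GO).isSome = true ∧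
    (PySem.Dict.get? (PySem.Dict.mk ((PySem.Dict.get? (PySem.Dict.mk ((PySem.Dict.get? (PySem.Dict.mk Go) "nodes").getD [])) GO).getD [])) "namespace").isSome = true
instance (Go : List (String × List (String × List (String × String)))) (Term : List String) : Decidable (Pre_annotation Go Term) := by unfold Pre_annotation; infer_instance
def pvWitness_annotation : (List (String × List (String × List (String × String)))) × List String :=
  ([("nodes", [("GO:1", [("namespace", "biological_process")]), ("GO:2", [("namespace", "cellular_component")])])], ["GO:1", "GO:2"])
def Spec_annotation (Go : List (String × List (String × List (String × String)))) (Term : List String) (out : List String × Int × List String × Int × List String × Int) : Prop := out = annotation_alt Go Term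
instance (Go : List (String × List (String × List (String × String)))) (Term : List String) (out : List String × Int × List String × Int × List String × Int) : Decidable (Spec_annotation Go Term out) := by unfold Spec_annotation; infer_instance

-- ===== CLAIM (what is proved, stated in full; the proofs are below) =====
def Claim_equal_annotation : Prop := ∀ (Go : List (String × List (String × List (String × String)))) (Term : List String), Dom_annotation Go Term → Pre_annotation Go Term → Spec_annotation Go Term (annotation Go Term)

-- ===== LEMMAS AND PROOFS =====
theorem annotation_fold (Go : List (String × List (String × List (String × String))))
    (Term : List String) (bp mf cc : List String) :
    Term.foldl (fun (st : List String × List String × List String) GO =>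
      let (bp, mf, cc) := st
      if pvNs Go GO = "biological_process" then (bp ++ [GO], mf, cc)
      else if pvNs Go GO = "molecular_function" then (bp, mf ++ [GO], cc)
      else if pvNs Go GO = "cellular_component" then (bp, mf, cc ++ [GO])
      else (bp, mf, cc)) (bp, mf, cc)
    = (bp ++ Term.filter (fun GO => pvNs Go GO == "biological_process"),
       mf ++ Term.filter (fun GO => pvNs Go GO == "molecular_function"),
       cc ++ Term.filter (fun GO => pvNs Go GO == "cellular_component")) := by
  induction Term generalizing bp mf cc with
  | nil => simp
  | cons t ts ih =>
    simp only [List.foldl_cons, List.filter_cons]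
    by_cases h1 : pvNs Go t = "biological_process"
    · simp [h1, ih]
    · by_cases h2 : pvNs Go t = "molecular_function"
      · simp [h2, ih]
      · by_cases h3 : pvNs Go t = "cellular_component"
        · simp [h1, h3, ih]
        · simp [h1, h2, h3, ih]

-- ===== VERDICT (by name: the statement is the Claim_ definition above) =====
theorem annotation_spec : Claim_equal_annotation := by
  intro Go Term _ _
  unfold Spec_annotation annotation annotation_alt
  simp only [annotation_fold, List.nil_append]
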